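-- pv_equiv track=rewrite | github.com/benjaminrall/advent-of-code-2021 | day10/part2.py | find_corrupted_chunk
-- ===== SOURCE A (Python) =====
-- closing = {'(':')', '[':']', '{':'}', '<':'>'}
--
-- def find_corrupted_chunk(chunk, i, opening):
--     if opening not in closing:
--         return (False, opening), i
--     i += 1
--     while i < len(chunk) - 1 and chunk[i] in closing:
--         returnExpression, i = find_corrupted_chunk(chunk, i, chunk[i])
--         if not returnExpression[0]:
--             return returnExpression, i
--         i += 1
--     if i >= len(chunk):
--         return (True, None), i
--     if chunk[i] == closing[opening]:
--         return (True, None), i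
--     if i < len(chunk):
--         return (False, chunk[i]), i
--     return (True, None), i
-- ===== SOURCE B (Python) =====
-- # Iterative single pass with an explicit stack of expected closing brackets.
-- closing = {'(':')', '[':']', '{':'}', '<':'>'}
--
-- def find_corrupted_chunk(chunk, i, opening):
--     if opening not in closing:
--         return (False, opening), i
--     stack = [closing[opening]]
--     i += 1
--     while i < len(chunk):
--         c = chunk[i]
--         if c in closing:
--             stack.append(closing[c])
--         elif c == stack[-1]:
--             stack.pop()
--             if not stack:
--                 return (True, None), i
--         else:
--             return (False, c), i
--         i += 1
--     return (True, None), i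
-- ===== Notes on version B (the rewrite author's own statement) =====
-- stated objective: alternative
-- what changed: A's recursive-descent matcher (one recursion level per nested bracket, a while loop re-entered after each recursive call) is replaced by a single iterative pass over the chunk keeping an explicit stack of expected closing brackets; Pre_ excludes only the inputs (opening a bracket key and i < -len(chunk)-1) on which both A and B raise IndexError.
-- intended difference: On inputs whose bracket scan from index i+1 runs off the end of the chunk still nested >= 2 deep (including an opening bracket at the last index, which A never descends into), A returns a 'corrupted' verdict at that final opener or an end index inflated by its leftover recursion depth, while B returns (True, None) with the index where the scan stopped - the intended answer for a merely incomplete chunk. — e.g. on find_corrupted_chunk("((", 0, "("): A returns ((false, some "("), 1), B returns ((true, none), 2)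
import Mathlib
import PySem

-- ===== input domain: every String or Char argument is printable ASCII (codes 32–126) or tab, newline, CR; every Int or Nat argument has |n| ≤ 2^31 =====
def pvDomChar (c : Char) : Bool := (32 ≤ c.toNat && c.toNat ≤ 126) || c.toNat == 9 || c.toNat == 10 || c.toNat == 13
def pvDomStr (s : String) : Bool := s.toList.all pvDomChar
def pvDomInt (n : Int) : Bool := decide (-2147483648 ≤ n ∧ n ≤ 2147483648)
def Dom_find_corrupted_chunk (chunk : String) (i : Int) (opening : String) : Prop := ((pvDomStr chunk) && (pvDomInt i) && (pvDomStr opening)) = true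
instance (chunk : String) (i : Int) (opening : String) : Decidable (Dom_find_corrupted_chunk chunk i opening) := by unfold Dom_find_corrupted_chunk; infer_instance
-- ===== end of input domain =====

-- B replaces A's recursive-descent bracket matcher by one iterative pass with an explicit
-- stack of expected closing brackets (objective: alternative decomposition, same cost);
-- on chunks that end while still nested ≥ 2 deep, A's returned value is wrong and B's
-- intended one — stated below as the intended difference D_.

-- ===== PORT A =====
-- the module constant: closing = {'(':')', '[':']', '{':'}', '<':'>'}
def pvClosing : List (Char × Char) := [('(', ')'), ('[', ']'), ('{', '}'), ('<', '>')]
-- `c in closing` for a single character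
def pvIsOpenChar (c : Char) : Bool := pvClosing.any (fun p => p.1 == c)
-- `closing[c]` (only used when pvIsOpenChar c)
def pvCloserOfChar (c : Char) : Char := ((pvClosing.find? (fun p => p.1 == c)).map (fun p => p.2)).getD ' '
-- `opening in closing` for an arbitrary string: true iff it is one of the four 1-char keys
def pvIsOpenStr (s : String) : Bool := match s.toList with | [c] => pvIsOpenChar c | _ => false
def pvCloserOfStr (s : String) : Char := match s.toList with | [c] => pvCloserOfChar c | _ => ' '
-- chunk[i]: exact (= Python, incl. negative-index wraparound) whenever -len ≤ i < len,
-- which Pre_ guarantees at every use site; the default is never read inside Pre_.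
def pvCharAt (l : List Char) (i : Int) : Char := (PySem.List.pyGet? l i).getD ' '

-- A's recursion, with the `while` loop as a second recursive function; the fuel 4*len+6 is a
-- termination guard only and is never exhausted on inputs admitted by Pre_ (proved below).
mutual
def pvGoA (l : List Char) (fuel : Nat) (i : Int) (opening : String) : (Bool × Option String) × Int :=
  match fuel with
  | 0 => ((true, none), i)
  | f + 1 =>
    if pvIsOpenStr opening = true then pvLoopA l f (i + 1) opening
    else ((false, some opening), i)
def pvLoopA (l : List Char) (fuel : Nat) (i : Int) (opening : String) : (Bool × Option String) × Int :=
  match fuel with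
  | 0 => ((true, none), i)
  | f + 1 =>
    if i < (l.length : Int) - 1 ∧ pvIsOpenChar (pvCharAt l i) = true then
      let r := pvGoA l f i (String.ofList [pvCharAt l i])
      if r.1.1 = false then r
      else pvLoopA l f (r.2 + 1) opening
    else if (l.length : Int) ≤ i then ((true, none), i)
    else if pvCharAt l i == pvCloserOfStr opening then ((true, none), i)
    else if i < (l.length : Int) then ((false, some (String.ofList [pvCharAt l i])), i)
    else ((true, none), i)
end

def find_corrupted_chunk (chunk : String) (i : Int) (opening : String) : (Bool × Option String) × Int :=
  pvGoA chunk.toList (4 * chunk.toList.length + 6) i opening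

-- ===== PORT B =====
-- Source B's `while i < len(chunk)` loop; the always-nonempty Python stack is top :: rest
def pvLoopB (l : List Char) (top : Char) (rest : List Char) (i : Int) : (Bool × Option String) × Int :=
  if i < (l.length : Int) then
    let c := pvCharAt l i
    if pvIsOpenChar c = true then pvLoopB l (pvCloserOfChar c) (top :: rest) (i + 1)
    else if c == top then
      match rest with
      | [] => ((true, none), i)
      | t :: rs => pvLoopB l t rs (i + 1)
    else ((false, some (String.ofList [c])), i)
  else ((true, none), i)
termination_by ((l.length : Int) - i).toNat
decreasing_by all_goals omega

def find_corrupted_chunk_alt (chunk : String) (i : Int) (opening : String) : (Bool × Option String) × Int :=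
  if pvIsOpenStr opening = true then pvLoopB chunk.toList (pvCloserOfStr opening) [] (i + 1)
  else ((false, some opening), i)

-- ===== PRECONDITION & SPEC =====
-- Pre_ excludes exactly the inputs on which the Python A raises IndexError (opening a bracket
-- key and i < -len(chunk)-1); B raises there too, and A returns normally on every input admitted.
def Pre_find_corrupted_chunk (chunk : String) (i : Int) (opening : String) : Prop :=
  pvIsOpenStr opening = true → -((chunk.toList.length : Int) + 1) ≤ i
instance (chunk : String) (i : Int) (opening : String) : Decidable (Pre_find_corrupted_chunk chunk i opening) := by unfold Pre_find_corrupted_chunk; infer_instance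
def pvWitness_find_corrupted_chunk : String × Int × String := ("(<>)", 0, "(")

-- the character sequence a scan of chunk starting at Python index j visits
-- (for -len ≤ j < 0 Python's negative indexing makes it the last -j characters and then the whole string)
def pvScanned (l : List Char) (j : Int) : List Char :=
  if j < 0 then l.drop ((l.length : Int) + j).toNat ++ l else l.drop j.toNat
-- bracket-nesting depth left when a scan with the given pending closers runs off the end of
-- the characters; none if the scan stops earlier (all brackets closed, or a mismatched character)
def pvScanTail : List Char → List Char → Option Nat
  | stack, [] => some stack.length
  | stack, c :: cs =>
    if pvIsOpenChar c then pvScanTail (pvCloserOfChar c :: stack) cs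
    else match stack with
      | [] => none
      | t :: rs => if c == t then (match rs with | [] => none | _ :: _ => pvScanTail rs cs) else none

-- On chunks whose bracket scan from index i+1 runs off the end still nested ≥ 2 deep
-- (including an opening bracket at the last index, which A never enters), A returns
-- either a "corrupted" verdict at that final opening bracket or an end index inflated
-- by its leftover recursion depth, while B returns (True, None) with the index where
-- the scan stopped — the intended value for a merely incomplete chunk.
def D_find_corrupted_chunk (chunk : String) (i : Int) (opening : String) : Prop :=
  pvIsOpenStr opening = true ∧ -((chunk.toList.length : Int) + 1) ≤ i ∧
  2 ≤ (pvScanTail [pvCloserOfStr opening] (pvScanned chunk.toList (i + 1))).getD 0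
instance (chunk : String) (i : Int) (opening : String) : Decidable (D_find_corrupted_chunk chunk i opening) := by unfold D_find_corrupted_chunk; infer_instance

def Spec_find_corrupted_chunk (chunk : String) (i : Int) (opening : String) (out : (Bool × Option String) × Int) : Prop := ¬ D_find_corrupted_chunk chunk i opening → out = find_corrupted_chunk_alt chunk i opening
instance (chunk : String) (i : Int) (opening : String) (out : (Bool × Option String) × Int) : Decidable (Spec_find_corrupted_chunk chunk i opening out) := by unfold Spec_find_corrupted_chunk; infer_instance

def pvDiffWitness_find_corrupted_chunk : String × Int × String := ("((", 0, "(")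
def pvDiffWitnessOut_find_corrupted_chunk : ((Bool × Option String) × Int) × ((Bool × Option String) × Int) :=
  (((false, some "("), 1), ((true, none), 2))

-- ===== CLAIM (what is proved, stated in full; the proofs are below) =====
def Claim_unchanged_find_corrupted_chunk : Prop := ∀ (chunk : String) (i : Int) (opening : String), Dom_find_corrupted_chunk chunk i opening → Pre_find_corrupted_chunk chunk i opening → Spec_find_corrupted_chunk chunk i opening (find_corrupted_chunk chunk i opening)
def Claim_changed_find_corrupted_chunk : Prop := Dom_find_corrupted_chunk (pvDiffWitness_find_corrupted_chunk.1) (pvDiffWitness_find_corrupted_chunk.2.1) (pvDiffWitness_find_corrupted_chunk.2.2) ∧ Pre_find_corrupted_chunk (pvDiffWitness_find_corrupted_chunk.1) (pvDiffWitness_find_corrupted_chunk.2.1) (pvDiffWitness_find_corrupted_chunk.2.2) ∧ D_find_corrupted_chunk (pvDiffWitness_find_corrupted_chunk.1) (pvDiffWitness_find_corrupted_chunk.2.1) (pvDiffWitness_find_corrupted_chunk.2.2) ∧ find_corrupted_chunk (pvDiffWitness_find_corrupted_chunk.1) (pvDiffWitness_find_corrupted_chunk.2.1) (pvDiffWitness_find_corrupted_chunk.2.2)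 = pvDiffWitnessOut_find_corrupted_chunk.1 ∧ find_corrupted_chunk_alt (pvDiffWitness_find_corrupted_chunk.1) (pvDiffWitness_find_corrupted_chunk.2.1) (pvDiffWitness_find_corrupted_chunk.2.2) = pvDiffWitnessOut_find_corrupted_chunk.2 ∧ pvDiffWitnessOut_find_corrupted_chunk.1 ≠ pvDiffWitnessOut_find_corrupted_chunk.2
def Claim_exact_find_corrupted_chunk : Prop := ∀ (chunk : String) (i : Int) (opening : String), Dom_find_corrupted_chunk chunk i opening → Pre_find_corrupted_chunk chunk i opening → D_find_corrupted_chunk chunk i opening → find_corrupted_chunk chunk i opening ≠ find_corrupted_chunk_alt chunk i opening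

-- ===== LEMMAS AND PROOFS =====

theorem pv_open_cases (c : Char) (h : pvIsOpenChar c = true) :
    c = '(' ∨ c = '[' ∨ c = '{' ∨ c = '<' := by
  simp [pvIsOpenChar, pvClosing] at h
  rcases h with h | h | h | h <;> subst h <;> simp

theorem pv_closer_not_open (s : String) (hs : pvIsOpenStr s = true) (c : Char)
    (hc : pvIsOpenChar c = true) : (c == pvCloserOfStr s) = false := by
  unfold pvIsOpenStr at hs
  unfold pvCloserOfStr
  rcases hl : s.toList with _ | ⟨o, _ | _⟩ <;> rw [hl] at hs
  · simp at hs
  · rcases pv_open_cases o hs with ho | ho | ho | ho <;>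
      rcases pv_open_cases c hc with h | h | h | h <;> subst ho <;> subst h <;> rfl
  · simp at hs

theorem pv_openStr_mk (c : Char) : pvIsOpenStr (String.ofList [c]) = pvIsOpenChar c := by
  simp [pvIsOpenStr]

theorem pv_closerStr_mk (c : Char) : pvCloserOfStr (String.ofList [c]) = pvCloserOfChar c := by
  simp [pvCloserOfStr]

-- closer characters are never opening characters
theorem pv_closerChar_not_open (c : Char) (hc : pvIsOpenChar c = true) :
    pvIsOpenChar (pvCloserOfChar c) = false := by
  rcases pv_open_cases c hc with h | h | h | h <;> subst h <;> rfl

theorem pv_closerStr_not_open (s : String) (hs : pvIsOpenStr s = true) :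
    pvIsOpenChar (pvCloserOfStr s) = false := by
  unfold pvIsOpenStr at hs
  unfold pvCloserOfStr
  rcases hl : s.toList with _ | ⟨o, _ | _⟩ <;> rw [hl] at hs
  · simp at hs
  · exact pv_closerChar_not_open o hs
  · simp at hs

-- an opening character never equals a non-opening one
theorem pv_open_ne (c t : Char) (hc : pvIsOpenChar c = true) (ht : pvIsOpenChar t = false) :
    (c == t) = false := by
  cases h : (c == t) with
  | false => rfl
  | true =>
    have : c = t := by simpa using h
    subst this
    rw [hc] at ht
    exact absurd ht (by simp)

-- PROOF-SIDE characterization of A: A's recursion computes the same value as this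
-- iterative loop Q (which keeps A's two end-of-chunk quirks); Q is then compared with B.
def pvLoopQ (l : List Char) (top : Char) (rest : List Char) (i : Int) : (Bool × Option String) × Int :=
  if (l.length : Int) ≤ i then ((true, none), i + (rest.length : Int))
  else
    let c := pvCharAt l i
    if c == top then
      match rest with
      | [] => ((true, none), i)
      | t :: rs => pvLoopQ l t rs (i + 1)
    else if pvIsOpenChar c = true ∧ i < (l.length : Int) - 1 then
      pvLoopQ l (pvCloserOfChar c) (top :: rest) (i + 1)
    else ((false, some (String.ofList [c])), i)
termination_by ((l.length : Int) - i).toNat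
decreasing_by all_goals omega

-- value of Q's loop as a function of the value of A's loop at one level with pending ancestors `rest`
def pvF (l : List Char) (rest : List Char) (r : (Bool × Option String) × Int) : (Bool × Option String) × Int :=
  if r.1.1 = true then
    if r.2 < (l.length : Int) then
      match rest with
      | [] => ((true, none), r.2)
      | t :: rs => pvLoopQ l t rs (r.2 + 1)
    else ((true, none), r.2 + (rest.length : Int))
  else r

theorem pvLoopA_big (l : List Char) (f : Nat) (j : Int) (opening : String)
    (h1 : 1 ≤ f) (hj : (l.length : Int) ≤ j) : pvLoopA l f j opening = ((true, none), j) := by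
  obtain ⟨g, rfl⟩ : ∃ g, f = g + 1 := ⟨f - 1, by omega⟩
  have hno : ¬ (j < (l.length : Int) - 1 ∧ pvIsOpenChar (pvCharAt l j) = true) := by
    rintro ⟨h, -⟩; omega
  simp only [pvLoopA]
  rw [if_neg hno, if_pos hj]

-- main correspondence: A's loop at one nesting level `opening`, Q's loop with the same
-- expected closer on top and the ancestors' closers `rest` below it
theorem pv_mainQ (l : List Char) : ∀ (fuel : Nat) (j : Int) (opening : String) (rest : List Char),
    pvIsOpenStr opening = true →
    2 * ((l.length : Int) - j) + 3 ≤ (fuel : Int) → 1 ≤ fuel →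
    pvLoopQ l (pvCloserOfStr opening) rest j = pvF l rest (pvLoopA l fuel j opening)
    ∧ j ≤ (pvLoopA l fuel j opening).2
    ∧ ((pvLoopA l fuel j opening).1.1 = true → (pvLoopA l fuel j opening).1.2 = none) := by
  intro fuel
  induction fuel using Nat.strong_induction_on with
  | _ fuel IH =>
  intro j opening rest hop hfuel h1
  obtain ⟨f, rfl⟩ : ∃ f, fuel = f + 1 := ⟨fuel - 1, by omega⟩
  by_cases hc : j < (l.length : Int) - 1 ∧ pvIsOpenChar (pvCharAt l j) = true
  · -- descend into a nested chunk
    have hfge : (2 : Int) * ((l.length : Int) - j) + 3 ≤ ((f + 1 : Nat) : Int) := hfuel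
    have hjl : j < (l.length : Int) - 1 := hc.1
    have hf5 : 5 ≤ f := by push_cast at hfge; omega
    obtain ⟨f', rfl⟩ : ∃ f', f = f' + 1 := ⟨f - 1, by omega⟩
    have hgo : pvGoA l (f' + 1) j (String.ofList [pvCharAt l j])
        = pvLoopA l f' (j + 1) (String.ofList [pvCharAt l j]) := by
      simp only [pvGoA]
      rw [if_pos (by rw [pv_openStr_mk]; exact hc.2)]
    have IH1 := IH f' (by omega) (j + 1) (String.ofList [pvCharAt l j])
      (pvCloserOfStr opening :: rest) (by rw [pv_openStr_mk]; exact hc.2)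
      (by push_cast at hfuel ⊢; omega) (by omega)
    rw [pv_closerStr_mk] at IH1
    set r1 := pvLoopA l f' (j + 1) (String.ofList [pvCharAt l j]) with hr1
    have hLHS : pvLoopQ l (pvCloserOfStr opening) rest j
        = pvLoopQ l (pvCloserOfChar (pvCharAt l j)) (pvCloserOfStr opening :: rest) (j + 1) := by
      conv_lhs => rw [pvLoopQ.eq_def]
      have hb1 : ¬ ((l.length : Int) ≤ j) := by omega
      have hb2 : (pvCharAt l j == pvCloserOfStr opening) = false :=
        pv_closer_not_open opening hop _ hc.2
      simp [hb1, hb2, hc.1, hc.2]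
    have hA : pvLoopA l (f' + 1 + 1) j opening
        = (if r1.1.1 = false then r1 else pvLoopA l (f' + 1) (r1.2 + 1) opening) := by
      simp only [pvLoopA]
      rw [if_pos hc, hgo]
    by_cases hb : r1.1.1 = true
    · have hbne : ¬ (r1.1.1 = false) := by simp [hb]
      by_cases hlt : r1.2 < (l.length : Int)
      · -- nested chunk closed by a real closing bracket: continue this level's loop
        have IH2 := IH (f' + 1) (by omega) (r1.2 + 1) opening rest hop
          (by have := IH1.2.1; push_cast at hfuel ⊢; omega) (by omega)
        refine ⟨?_, ?_, ?_⟩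
        · rw [hLHS, IH1.1]
          have hstep : pvF l (pvCloserOfStr opening :: rest) r1
              = pvLoopQ l (pvCloserOfStr opening) rest (r1.2 + 1) := by
            simp [pvF, hb, hlt]
          rw [hstep, IH2.1, hA, if_neg hbne]
        · rw [hA, if_neg hbne]
          have h2 := IH2.2.1
          have h3 := IH1.2.1
          omega
        · rw [hA, if_neg hbne]
          exact IH2.2.2
      · -- nested call ran off the end of the chunk
        have hbig : pvLoopA l (f' + 1) (r1.2 + 1) opening = ((true, none), r1.2 + 1) :=
          pvLoopA_big l (f' + 1) (r1.2 + 1) opening (by omega) (by omega)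
        have hAval : pvLoopA l (f' + 1 + 1) j opening = ((true, none), r1.2 + 1) := by
          rw [hA, if_neg hbne, hbig]
        refine ⟨?_, ?_, ?_⟩
        · rw [hLHS, IH1.1, hAval]
          have hnext : ¬ (r1.2 + 1 < (l.length : Int)) := by omega
          simp [pvF, hb, hlt, hnext]
          omega
        · rw [hAval]
          have := IH1.2.1
          simp
          omega
        · rw [hAval]
          intro
          rfl
    · -- nested chunk corrupted: propagate
      have hbf : r1.1.1 = false := by
        cases hx : r1.1.1 with
        | false => rfl
        | true => exact absurd hx hb
      have hAval : pvLoopA l (f' + 1 + 1) j opening = r1 := by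
        rw [hA, if_pos hbf]
      refine ⟨?_, ?_, ?_⟩
      · rw [hLHS, IH1.1, hAval]
        simp [pvF, hbf]
      · rw [hAval]
        have := IH1.2.1
        omega
      · rw [hAval]
        intro h
        exact absurd h hb
  · -- this level's loop makes no step
    have hA0 : pvLoopA l (f + 1) j opening
        = (if (l.length : Int) ≤ j then ((true, none), j)
           else if pvCharAt l j == pvCloserOfStr opening then ((true, none), j)
           else if j < (l.length : Int) then ((false, some (String.ofList [pvCharAt l j])), j)
           else ((true, none), j)) := by
      simp only [pvLoopA]
      rw [if_neg hc]
    by_cases hge : (l.length : Int) ≤ j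
    · have hAval : pvLoopA l (f + 1) j opening = ((true, none), j) := by
        rw [hA0, if_pos hge]
      refine ⟨?_, ?_, ?_⟩
      · rw [hAval]
        rw [pvLoopQ.eq_def, if_pos hge]
        have hnl : ¬ ((j : Int) < (l.length : Int)) := by omega
        simp [pvF, hnl]
      · rw [hAval]
      · rw [hAval]
        intro
        rfl
    · by_cases hcl : (pvCharAt l j == pvCloserOfStr opening) = true
      · -- this level's closing bracket found
        have hAval : pvLoopA l (f + 1) j opening = ((true, none), j) := by
          rw [hA0, if_neg hge, if_pos hcl]
        refine ⟨?_, ?_, ?_⟩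
        · rw [hAval]
          rw [pvLoopQ.eq_def, if_neg hge, if_pos hcl]
          have hjl : (j : Int) < (l.length : Int) := by omega
          cases rest with
          | nil => simp [pvF, hjl]
          | cons t rs => simp [pvF, hjl]
        · rw [hAval]
        · rw [hAval]
          intro
          rfl
      · -- corrupted character found at this level
        have hjl : (j : Int) < (l.length : Int) := by omega
        have hAval : pvLoopA l (f + 1) j opening
            = ((false, some (String.ofList [pvCharAt l j])), j) := by
          rw [hA0, if_neg hge, if_neg hcl, if_pos hjl]
        refine ⟨?_, ?_, ?_⟩
        · rw [hAval]
          rw [pvLoopQ.eq_def, if_neg hge, if_neg hcl]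
          have hno : ¬ (pvIsOpenChar (pvCharAt l j) = true ∧ j < (l.length : Int) - 1) := by
            intro hx
            exact hc ⟨hx.2, hx.1⟩
          rw [if_neg hno]
          simp [pvF]
        · rw [hAval]
        · rw [hAval]
          intro h
          exact absurd h (by simp)

-- A's value equals the Q loop's value (both end-of-chunk quirks included)
theorem pv_AQ (chunk : String) (i : Int) (opening : String)
    (hpre : Pre_find_corrupted_chunk chunk i opening) :
    find_corrupted_chunk chunk i opening
      = (if pvIsOpenStr opening = true
          then pvLoopQ chunk.toList (pvCloserOfStr opening) [] (i + 1)
          else ((false, some opening), i)) := by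
  unfold find_corrupted_chunk
  by_cases hop : pvIsOpenStr opening = true
  · rw [if_pos hop]
    have hpre' := hpre hop
    have hfe : 4 * chunk.toList.length + 6 = (4 * chunk.toList.length + 5) + 1 := by omega
    have hg : pvGoA chunk.toList ((4 * chunk.toList.length + 5) + 1) i opening
        = pvLoopA chunk.toList (4 * chunk.toList.length + 5) (i + 1) opening := by
      simp only [pvGoA]
      rw [if_pos hop]
    rw [hfe, hg]
    obtain ⟨heq, hle, hnone⟩ := pv_mainQ chunk.toList (4 * chunk.toList.length + 5) (i + 1)
      opening [] hop (by push_cast; omega) (by omega)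
    rw [heq]
    set r := pvLoopA chunk.toList (4 * chunk.toList.length + 5) (i + 1) opening with hr
    by_cases hb : r.1.1 = true
    · have hn := hnone hb
      have hrval : r = ((true, none), r.2) := by
        calc r = ((r.1.1, r.1.2), r.2) := rfl
        _ = ((true, none), r.2) := by rw [hb, hn]
      rw [hrval]
      simp only [pvF]
      split_ifs <;> simp
    · simp [pvF, hb]
  · rw [if_neg hop]
    have hfe : 4 * chunk.toList.length + 6 = (4 * chunk.toList.length + 5) + 1 := by omega
    rw [hfe]
    simp only [pvGoA]
    rw [if_neg hop]

-- scanned-sequence step and end lemmas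
theorem pvCharAt_neg (l : List Char) (j : Int) (h1 : -(l.length : Int) ≤ j) (h2 : j < 0) :
    some (pvCharAt l j) = l[((l.length : Int) + j).toNat]? := by
  unfold pvCharAt
  have hj' : PySem.List.pyGet? l j = PySem.List.pyGet? l (-(((-j).toNat : Nat) : Int)) := by
    congr 1; omega
  rw [hj', PySem.List.pyGet?_neg_natCast l (-j).toNat (by omega) (by omega)]
  rw [List.getElem?_eq_getElem (by omega), List.getElem?_eq_getElem (by omega)]
  simp
  congr 1
  omega

theorem pvCharAt_nonneg (l : List Char) (j : Int) (h1 : 0 ≤ j) (h2 : j < (l.length : Int)) :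
    some (pvCharAt l j) = l[j.toNat]? := by
  unfold pvCharAt
  rw [PySem.List.pyGet?_eq_some_getElem l h1 h2, List.getElem?_eq_getElem (by omega)]
  rfl

theorem pvScanned_nil (l : List Char) (j : Int) (h1 : -(l.length : Int) ≤ j)
    (h2 : (l.length : Int) ≤ j) : pvScanned l j = [] := by
  unfold pvScanned
  rw [if_neg (by omega)]
  exact List.drop_eq_nil_of_le (by omega)

theorem pvScanned_cons (l : List Char) (j : Int) (h1 : -(l.length : Int) ≤ j)
    (h2 : j < (l.length : Int)) :
    pvScanned l j = pvCharAt l j :: pvScanned l (j + 1) := by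
  unfold pvScanned
  by_cases hneg : j < 0
  · rw [if_pos hneg]
    have hk : ((l.length : Int) + j).toNat < l.length := by omega
    have hchar : pvCharAt l j = l[((l.length : Int) + j).toNat]'hk := by
      have h := pvCharAt_neg l j h1 hneg
      rw [List.getElem?_eq_getElem hk] at h
      exact Option.some.inj h
    by_cases hneg1 : j + 1 < 0
    · rw [if_pos hneg1]
      have he : ((l.length : Int) + (j + 1)).toNat = ((l.length : Int) + j).toNat + 1 := by omega
      rw [he, hchar]
      conv_lhs => rw [List.drop_eq_getElem_cons hk]
      rw [List.cons_append]
    · rw [if_neg hneg1]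
      have hj : j = -1 := by omega
      subst hj
      have h2' : ((-1 : Int) + 1).toNat = 0 := by norm_num
      rw [h2', hchar]
      conv_lhs => rw [List.drop_eq_getElem_cons hk]
      rw [List.cons_append]
      have h1' : ((l.length : Int) + -1).toNat + 1 = l.length := by omega
      rw [h1', List.drop_length, List.drop_zero]
      simp
  · rw [if_neg hneg, if_neg (by omega)]
    have hk : j.toNat < l.length := by omega
    have hchar : pvCharAt l j = l[j.toNat]'hk := by
      have h := pvCharAt_nonneg l j (by omega) h2
      rw [List.getElem?_eq_getElem hk] at h
      exact Option.some.inj h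
    have he : (j + 1).toNat = j.toNat + 1 := by omega
    rw [he, hchar]
    conv_lhs => rw [List.drop_eq_getElem_cons hk]

-- one-step evaluation of the two loops when the index is in range
theorem pvLoopB_step (l : List Char) (top : Char) (rest : List Char) (i : Int)
    (hlt : i < (l.length : Int)) :
    pvLoopB l top rest i =
      (if pvIsOpenChar (pvCharAt l i) = true then
        pvLoopB l (pvCloserOfChar (pvCharAt l i)) (top :: rest) (i + 1)
      else if pvCharAt l i == top then
        (match rest with
         | [] => ((true, none), i)
         | t :: rs => pvLoopB l t rs (i + 1))
      else ((false, some (String.ofList [pvCharAt l i])), i)) := by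
  rw [pvLoopB.eq_def, if_pos hlt]

theorem pvLoopQ_step (l : List Char) (top : Char) (rest : List Char) (i : Int)
    (hlt : i < (l.length : Int)) :
    pvLoopQ l top rest i =
      (if pvCharAt l i == top then
        (match rest with
         | [] => ((true, none), i)
         | t :: rs => pvLoopQ l t rs (i + 1))
      else if pvIsOpenChar (pvCharAt l i) = true ∧ i < (l.length : Int) - 1 then
        pvLoopQ l (pvCloserOfChar (pvCharAt l i)) (top :: rest) (i + 1)
      else ((false, some (String.ofList [pvCharAt l i])), i)) := by
  rw [pvLoopQ.eq_def, if_neg (by omega)]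

-- Q and B agree from any state whose scan does not run off the end nested >= 2 deep
theorem pv_QB_eq (l : List Char) : ∀ (n : Nat) (i : Int) (top : Char) (rest : List Char),
    ((l.length : Int) - i).toNat ≤ n → -(l.length : Int) ≤ i →
    pvIsOpenChar top = false → (∀ x ∈ rest, pvIsOpenChar x = false) →
    (∀ d, pvScanTail (top :: rest) (pvScanned l i) = some d → d ≤ 1) →
    pvLoopQ l top rest i = pvLoopB l top rest i := by
  intro n
  induction n with
  | zero =>
    intro i top rest hn hlo htop hrest hH
    have hge : (l.length : Int) ≤ i := by omega
    have hscan : pvScanTail (top :: rest) (pvScanned l i) = some (rest.length + 1) := by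
      rw [pvScanned_nil l i hlo hge]
      simp [pvScanTail]
    have hle := hH _ hscan
    have hr : rest = [] := by
      cases rest with
      | nil => rfl
      | cons a as => simp at hle
    subst hr
    rw [pvLoopQ.eq_def, if_pos hge, pvLoopB.eq_def, if_neg (by omega)]
    simp
  | succ n IHn =>
    intro i top rest hn hlo htop hrest hH
    by_cases hge : (l.length : Int) ≤ i
    · have hscan : pvScanTail (top :: rest) (pvScanned l i) = some (rest.length + 1) := by
        rw [pvScanned_nil l i hlo hge]
        simp [pvScanTail]
      have hle := hH _ hscan
      have hr : rest = [] := by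
        cases rest with
        | nil => rfl
        | cons a as => simp at hle
      subst hr
      rw [pvLoopQ.eq_def, if_pos hge, pvLoopB.eq_def, if_neg (by omega)]
      simp
    · have hlt : i < (l.length : Int) := by omega
      have hcons := pvScanned_cons l i hlo hlt
      cases hop : pvIsOpenChar (pvCharAt l i) with
      | true =>
        have hne : (pvCharAt l i == top) = false := pv_open_ne _ top hop htop
        by_cases hlast : i < (l.length : Int) - 1
        · -- both push and continue
          have hH' : ∀ d, pvScanTail (pvCloserOfChar (pvCharAt l i) :: top :: rest)
              (pvScanned l (i + 1)) = some d → d ≤ 1 := by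
            intro d hd
            apply hH
            rw [hcons]
            simp [pvScanTail, hop, hd]
          rw [pvLoopQ_step l top rest i hlt, if_neg (by simp [hne]), if_pos ⟨hop, hlast⟩]
          rw [pvLoopB_step l top rest i hlt, if_pos hop]
          exact IHn (i + 1) (pvCloserOfChar (pvCharAt l i)) (top :: rest) (by omega) (by omega)
            (pv_closerChar_not_open _ hop)
            (by intro x hx
                rcases List.mem_cons.mp hx with h | h
                · subst h; exact htop
                · exact hrest x h) hH'
        · -- opener at the last index: the scan runs off the end >= 2 deep, excluded by hH
          exfalso
          have hscan : pvScanTail (top :: rest) (pvScanned l i) = some (rest.length + 2) := by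
            rw [hcons, pvScanned_nil l (i + 1) (by omega) (by omega)]
            simp [pvScanTail, hop]
            try omega
          have := hH _ hscan
          omega
      | false =>
        by_cases hmatch : (pvCharAt l i == top) = true
        · cases rest with
          | nil =>
            rw [pvLoopQ_step l top [] i hlt, if_pos hmatch]
            rw [pvLoopB_step l top [] i hlt, if_neg (by simp [hop]), if_pos hmatch]
          | cons t rs =>
            have hH' : ∀ d, pvScanTail (t :: rs) (pvScanned l (i + 1)) = some d → d ≤ 1 := by
              intro d hd
              apply hH
              rw [hcons]
              simp [pvScanTail, hop, hmatch, hd]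
            rw [pvLoopQ_step l top (t :: rs) i hlt, if_pos hmatch]
            rw [pvLoopB_step l top (t :: rs) i hlt, if_neg (by simp [hop]), if_pos hmatch]
            exact IHn (i + 1) t rs (by omega) (by omega) (hrest t (by simp))
              (by intro x hx; exact hrest x (by simp [hx])) hH'
        · rw [pvLoopQ_step l top rest i hlt, if_neg (by simp [hmatch]), if_neg (by simp [hop])]
          rw [pvLoopB_step l top rest i hlt, if_neg (by simp [hop]), if_neg (by simp [hmatch])]

-- Q and B differ from any state whose scan runs off the end nested >= 2 deep
theorem pv_QB_ne (l : List Char) : ∀ (n : Nat) (i : Int) (top : Char) (rest : List Char) (d : Nat),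
    ((l.length : Int) - i).toNat ≤ n → -(l.length : Int) ≤ i →
    pvIsOpenChar top = false → (∀ x ∈ rest, pvIsOpenChar x = false) →
    pvScanTail (top :: rest) (pvScanned l i) = some d → 2 ≤ d →
    pvLoopQ l top rest i ≠ pvLoopB l top rest i := by
  intro n
  induction n with
  | zero =>
    intro i top rest d hn hlo htop hrest hscan hd
    have hge : (l.length : Int) ≤ i := by omega
    rw [pvScanned_nil l i hlo hge] at hscan
    have hlen : rest.length + 1 = d := by
      have he : pvScanTail (top :: rest) ([] : List Char) = some (rest.length + 1) := by
        simp [pvScanTail]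
      rw [he] at hscan
      exact Option.some.inj hscan
    rw [pvLoopQ.eq_def, if_pos hge, pvLoopB.eq_def, if_neg (by omega)]
    intro h
    have h2 : i + (rest.length : Int) = i := congrArg Prod.snd h
    omega
  | succ n IHn =>
    intro i top rest d hn hlo htop hrest hscan hd
    by_cases hge : (l.length : Int) ≤ i
    · rw [pvScanned_nil l i hlo hge] at hscan
      have hlen : rest.length + 1 = d := by
        have he : pvScanTail (top :: rest) ([] : List Char) = some (rest.length + 1) := by
          simp [pvScanTail]
        rw [he] at hscan
        exact Option.some.inj hscan
      rw [pvLoopQ.eq_def, if_pos hge, pvLoopB.eq_def, if_neg (by omega)]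
      intro h
      have h2 : i + (rest.length : Int) = i := congrArg Prod.snd h
      omega
    · have hlt : i < (l.length : Int) := by omega
      have hcons := pvScanned_cons l i hlo hlt
      cases hop : pvIsOpenChar (pvCharAt l i) with
      | true =>
        have hne : (pvCharAt l i == top) = false := pv_open_ne _ top hop htop
        by_cases hlast : i < (l.length : Int) - 1
        · rw [hcons] at hscan
          simp only [pvScanTail, hop, if_pos] at hscan
          rw [pvLoopQ_step l top rest i hlt, if_neg (by simp [hne]), if_pos ⟨hop, hlast⟩]
          rw [pvLoopB_step l top rest i hlt, if_pos hop]
          exact IHn (i + 1) (pvCloserOfChar (pvCharAt l i)) (top :: rest) d (by omega) (by omega)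
            (pv_closerChar_not_open _ hop)
            (by intro x hx
                rcases List.mem_cons.mp hx with h | h
                · subst h; exact htop
                · exact hrest x h) hscan hd
        · -- opener at the last index: Q reports corruption, B reports incompleteness
          rw [pvLoopQ_step l top rest i hlt, if_neg (by simp [hne]), if_neg (by rintro ⟨-, h⟩; omega)]
          rw [pvLoopB_step l top rest i hlt, if_pos hop]
          rw [pvLoopB.eq_def, if_neg (by omega : ¬ (i + 1 < (l.length : Int)))]
          intro h
          have h2 := congrArg (fun p => p.1.1) h
          simp at h2
      | false =>
        by_cases hmatch : (pvCharAt l i == top) = true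
        · cases rest with
          | nil =>
            exfalso
            rw [hcons] at hscan
            simp [pvScanTail, hop, hmatch] at hscan
          | cons t rs =>
            rw [hcons] at hscan
            simp only [pvScanTail, hop, hmatch] at hscan
            simp at hscan
            rw [pvLoopQ_step l top (t :: rs) i hlt, if_pos hmatch]
            rw [pvLoopB_step l top (t :: rs) i hlt, if_neg (by simp [hop]), if_pos hmatch]
            exact IHn (i + 1) t rs d (by omega) (by omega) (hrest t (by simp))
              (by intro x hx; exact hrest x (by simp [hx])) hscan hd
        · exfalso
          rw [hcons] at hscan
          simp [pvScanTail, hop, hmatch] at hscan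

-- ===== VERDICT (by name: the statement is the Claim_ definition above) =====
theorem find_corrupted_chunk_spec : Claim_unchanged_find_corrupted_chunk := by
  intro chunk i opening hdom hpre hnd
  rw [pv_AQ chunk i opening hpre]
  unfold find_corrupted_chunk_alt
  by_cases hop : pvIsOpenStr opening = true
  · rw [if_pos hop, if_pos hop]
    have hpre' := hpre hop
    apply pv_QB_eq chunk.toList (((chunk.toList.length : Int) - (i + 1)).toNat) (i + 1)
      (pvCloserOfStr opening) [] (le_refl _) (by omega)
      (pv_closerStr_not_open opening hop) (by intro x hx; simp at hx)
    intro d hd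
    by_contra hgt
    exact hnd ⟨hop, by omega, by rw [hd]; simpa using (by omega : 2 ≤ d)⟩
  · rw [if_neg hop, if_neg hop]

theorem find_corrupted_chunk_changed : Claim_changed_find_corrupted_chunk := by
  unfold Claim_changed_find_corrupted_chunk
  refine ⟨by decide, by decide, by decide, by decide, ?_, by decide⟩
  show find_corrupted_chunk_alt "((" 0 "(" = ((true, none), 2)
  unfold find_corrupted_chunk_alt
  rw [if_pos (by decide)]
  rw [pvLoopB_step "((".toList (pvCloserOfStr "(") [] (0 + 1) (by decide), if_pos (by decide)]
  rw [pvLoopB.eq_def, if_neg (by decide)]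
  norm_num

theorem find_corrupted_chunk_tight : Claim_exact_find_corrupted_chunk := by
  intro chunk i opening hdom hpre hD
  obtain ⟨hop, hlo, hsc⟩ := hD
  rw [pv_AQ chunk i opening hpre]
  unfold find_corrupted_chunk_alt
  rw [if_pos hop, if_pos hop]
  cases hd : pvScanTail [pvCloserOfStr opening] (pvScanned chunk.toList (i + 1)) with
  | none => rw [hd] at hsc; simp at hsc
  | some d =>
    rw [hd] at hsc
    simp at hsc
    exact pv_QB_ne chunk.toList (((chunk.toList.length : Int) - (i + 1)).toNat) (i + 1)
      (pvCloserOfStr opening) [] d (le_refl _) (by omega)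
      (pv_closerStr_not_open opening hop) (by intro x hx; simp at hx) hd hsc
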